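-- pv_equiv track=rewrite | github.com/MrGameAndWatch/pm4py-source | pm4py/algo/discovery/est_miner/hooks/pre_pruning_strategy.py | _follows
-- ===== SOURCE A (Python) =====
-- def _follows(a1, a2, trace, key):
--     # Returns True, if a2 eventually follows a1 in the trace
--     found_a1 = False
--     follows  = 0
--     for e in trace:
--         if found_a1:
--             if e[key] == a2:
--                 follows = 1
--         if e[key] == a1:
--             found_a1 = True
--     return follows
-- ===== SOURCE B (Python) =====
-- def _follows(a1, a2, trace, key):
--     # precompute-then-locate-then-suffix-scan decomposition
--     keys = [e[key] for e in trace]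
--     if a1 not in keys:
--         return 0
--     i = keys.index(a1)
--     return 1 if a2 in keys[i + 1:] else 0
-- ===== Notes on version B (the rewrite author's own statement) =====
-- stated objective: alternative
-- what changed: Replaces the single streaming flag-and-accumulator scan with a three-stage decomposition: extract all keys in one pass, locate the first occurrence of a1 with list.index, then test membership of a2 in the suffix after it.
import Mathlib
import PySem

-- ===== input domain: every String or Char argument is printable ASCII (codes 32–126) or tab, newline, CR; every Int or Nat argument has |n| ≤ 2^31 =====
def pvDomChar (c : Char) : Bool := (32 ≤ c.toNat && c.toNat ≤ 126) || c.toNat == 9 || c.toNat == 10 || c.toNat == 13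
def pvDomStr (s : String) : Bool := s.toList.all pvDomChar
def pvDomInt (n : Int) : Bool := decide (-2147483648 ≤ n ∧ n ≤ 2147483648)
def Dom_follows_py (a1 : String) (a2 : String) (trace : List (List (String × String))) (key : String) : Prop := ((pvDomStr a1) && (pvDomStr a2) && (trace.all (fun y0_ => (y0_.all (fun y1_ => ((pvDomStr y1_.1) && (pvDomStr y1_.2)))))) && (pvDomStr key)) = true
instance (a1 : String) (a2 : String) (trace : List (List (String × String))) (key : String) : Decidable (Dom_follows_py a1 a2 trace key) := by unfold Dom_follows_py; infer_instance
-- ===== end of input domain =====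

-- B replaces A's streaming flag-scan by: extract all keys, find first a1, test a2 in the suffix (alternative decomposition, same cost).
-- ===== PORT A =====
-- e[key] on a dict (assoc list, first match); Pre_ guarantees the key is present, so getD "" is never reached on admitted inputs
def pvGetKey (e : List (String × String)) (key : String) : String :=
  ((e.find? (fun p => p.1 == key)).map (fun p => p.2)).getD ""

def pvStepA (a1 a2 : String) (st : Bool × Int) (v : String) : Bool × Int :=
  let st1 := if st.1 then (if v == a2 then (st.1, (1 : Int)) else st) else st
  if v == a1 then (true, st1.2) else st1

def follows_py (a1 : String) (a2 : String) (trace : List (List (String × String))) (key : String) : Int :=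
  (trace.foldl (fun st e => pvStepA a1 a2 st (pvGetKey e key)) (false, 0)).2

-- ===== PORT B =====
def follows_py_alt (a1 : String) (a2 : String) (trace : List (List (String × String))) (key : String) : Int :=
  let keys := trace.map (fun e => pvGetKey e key)
  match PySem.List.index? keys a1 with
  | none => 0
  | some i => if a2 ∈ keys.drop (i + 1) then 1 else 0

-- ===== PRECONDITION =====
-- Pre_ excludes exactly the inputs where some trace element lacks `key` (Python raises KeyError there).
def Pre_follows_py (a1 : String) (a2 : String) (trace : List (List (String × String))) (key : String) : Prop :=
  ∀ e ∈ trace, (e.find? (fun p => p.1 == key)).isSome = true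
instance (a1 : String) (a2 : String) (trace : List (List (String × String))) (key : String) : Decidable (Pre_follows_py a1 a2 trace key) := by unfold Pre_follows_py; infer_instance

def pvWitness_follows_py : String × String × (List (List (String × String))) × String :=
  ("a", "b", [[("k", "a")], [("k", "b")]], "k")

-- ===== PRECONDITION & SPEC =====
def Spec_follows_py (a1 : String) (a2 : String) (trace : List (List (String × String))) (key : String) (out : Int) : Prop := out = follows_py_alt a1 a2 trace key
instance (a1 : String) (a2 : String) (trace : List (List (String × String))) (key : String) (out : Int) : Decidable (Spec_follows_py a1 a2 trace key out) := by unfold Spec_follows_py; infer_instance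

-- ===== CLAIM (what is proved, stated in full; the proofs are below) =====
def Claim_equal_follows_py : Prop := ∀ (a1 : String) (a2 : String) (trace : List (List (String × String))) (key : String), Dom_follows_py a1 a2 trace key → Pre_follows_py a1 a2 trace key → Spec_follows_py a1 a2 trace key (follows_py a1 a2 trace key)

-- ===== LEMMAS AND PROOFS =====

-- pvStepA from the not-yet-found state: just watch for a1
theorem stepA_false (a1 a2 k : String) (f : Int) :
    pvStepA a1 a2 (false, f) k = if k = a1 then (true, f) else (false, f) := by
  simp [pvStepA]

-- once found_a1 is true, the tail of the fold sets follows to 1 iff a2 occurs in the remaining keys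
theorem foldl_stepA_true (a1 a2 : String) (ks : List String) (f : Int) :
    ks.foldl (pvStepA a1 a2) (true, f) = (true, if a2 ∈ ks then 1 else f) := by
  induction ks generalizing f with
  | nil => simp
  | cons k ks ih =>
    simp only [List.foldl_cons, pvStepA, List.mem_cons]
    by_cases h2 : k = a2 <;> by_cases h1 : k = a1 <;>
      simp [h1, h2, ih] <;> split_ifs <;> simp_all

-- the full fold from the initial state equals B's locate-then-suffix-membership formula
theorem foldl_stepA_false (a1 a2 : String) (ks : List String) :
    (ks.foldl (pvStepA a1 a2) (false, 0)).2 =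
      (match PySem.List.index? ks a1 with
       | none => 0
       | some i => if a2 ∈ ks.drop (i + 1) then 1 else 0 : Int) := by
  induction ks with
  | nil => simp [PySem.List.index?]
  | cons k ks ih =>
    rw [List.foldl_cons, stepA_false]
    by_cases h1 : k = a1
    · rw [if_pos h1, h1, PySem.List.index?_cons_self, foldl_stepA_true]
      simp
    · rw [if_neg h1, ih, PySem.List.index?_cons_of_ne ks h1]
      cases hidx : PySem.List.index? ks a1 <;> simp [List.drop_succ_cons]

-- ===== VERDICT (by name: the statement is the Claim_ definition above) =====
theorem follows_py_spec : Claim_equal_follows_py := by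
  intro a1 a2 trace key _ _
  unfold Spec_follows_py follows_py follows_py_alt
  rw [← List.foldl_map (f := fun e => pvGetKey e key) (g := pvStepA a1 a2)]
  exact foldl_stepA_false a1 a2 (trace.map (fun e => pvGetKey e key))
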